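-- pv_equiv track=rewrite | github.com/LeeSeungYun1020/Gets | data/StylePreference/get_favorite_style.py | oneHotDecoder
-- ===== SOURCE A (Python) =====
-- def oneHotDecoder(fit):
--     singleValuelist = []
--     value = 1
--
--     while fit>0:
--         if fit%2 == 1:
--             singleValuelist.append(value)
--         fit = fit >> 1
--         value = value << 1
--
--     return singleValuelist
-- ===== SOURCE B (Python) =====
-- def oneHotDecoder(fit):
--     result = []
--     while fit > 0:
--         low = fit & -fit
--         result.append(low)
--         fit ^= low
--     return result
-- ===== Notes on version B (the rewrite author's own statement) =====
-- stated objective: alternative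
-- what changed: Instead of scanning every bit position with a parity test and shifts while carrying a running power value, B loops once per set bit using the lowest-set-bit trick: low = fit & -fit is itself the power value to append, and xor-ing it away clears that bit.
import Mathlib
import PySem

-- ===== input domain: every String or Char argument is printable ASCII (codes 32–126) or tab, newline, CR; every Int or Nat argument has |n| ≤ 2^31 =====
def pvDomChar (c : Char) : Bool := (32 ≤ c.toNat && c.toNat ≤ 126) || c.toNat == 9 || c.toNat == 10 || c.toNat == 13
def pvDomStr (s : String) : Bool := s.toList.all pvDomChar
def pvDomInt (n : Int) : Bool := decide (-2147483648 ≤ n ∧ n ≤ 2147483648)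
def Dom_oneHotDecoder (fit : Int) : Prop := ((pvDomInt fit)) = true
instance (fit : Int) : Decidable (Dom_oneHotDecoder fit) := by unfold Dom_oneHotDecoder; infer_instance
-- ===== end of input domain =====

-- B replaces A's per-bit-position scan (parity test / shifts with a carried power value) by a loop
-- over the set bits only, via the lowest-set-bit trick (fit & -fit); objective: alternative.

-- ===== PORT A =====
-- while fit>0: if fit%2==1: append value; fit >>= 1; value <<= 1   (tail recursion on the same state)
def oneHotLoopA (fit value : Int) (acc : List Int) : List Int :=
  if h : fit > 0 then
    oneHotLoopA (fit >>> 1) (value <<< 1)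
      (if PySem.Int.mod fit 2 = 1 then acc ++ [value] else acc)
  else acc
termination_by fit.toNat
decreasing_by
  cases fit with
  | ofNat n =>
      rw [show (Int.ofNat n >>> 1) = Int.ofNat (n >>> 1) from rfl]
      show n >>> 1 < n
      rw [Nat.shiftRight_one]
      simp only [Int.ofNat_eq_natCast] at h
      omega
  | negSucc n => simp only [Int.negSucc_eq] at h; omega

def oneHotDecoder (fit : Int) : List Int := oneHotLoopA fit 1 []

-- ===== PORT B =====
-- Nat-level lowest-set-bit and the facts the B loop's termination proof cites (decreasing_by below).
def lowb (n : Nat) : Nat := Nat.ldiff n (n - 1)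

theorem testBit_lowb (n i : Nat) : (lowb n).testBit i = (n.testBit i && !(n - 1).testBit i) := by
  simp [lowb, Nat.testBit_ldiff]

theorem lowb_odd (n : Nat) (h : n % 2 = 1) : lowb n = 1 := by
  apply Nat.eq_of_testBit_eq
  intro i
  cases i with
  | zero =>
      rw [testBit_lowb]
      simp only [Nat.testBit_zero]
      rw [h, show (n - 1) % 2 = 0 by omega]
      decide
  | succ i =>
      rw [testBit_lowb]
      simp only [Nat.testBit_succ]
      rw [show (n - 1) / 2 = n / 2 by omega, show (1 : Nat) / 2 = 0 by norm_num]
      simp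

theorem lowb_even (m : Nat) (h : 0 < m) : lowb (2 * m) = 2 * lowb m := by
  apply Nat.eq_of_testBit_eq
  intro i
  cases i with
  | zero =>
      rw [testBit_lowb]
      simp only [Nat.testBit_zero]
      rw [show 2 * m % 2 = 0 by omega, show 2 * lowb m % 2 = 0 by omega]
      simp
  | succ i =>
      rw [testBit_lowb]
      simp only [Nat.testBit_succ]
      rw [show 2 * m / 2 = m by omega, show (2 * m - 1) / 2 = m - 1 by omega,
          show 2 * lowb m / 2 = lowb m by omega, testBit_lowb]

theorem xor_one_odd (n : Nat) (h : n % 2 = 1) : n ^^^ 1 = n - 1 := by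
  apply Nat.eq_of_testBit_eq
  intro i
  cases i with
  | zero =>
      rw [Nat.testBit_xor]
      simp only [Nat.testBit_zero]
      rw [h, show (n - 1) % 2 = 0 by omega]
      decide
  | succ i =>
      rw [Nat.testBit_xor]
      simp only [Nat.testBit_succ]
      rw [show (n - 1) / 2 = n / 2 by omega, show (1 : Nat) / 2 = 0 by norm_num]
      simp

theorem xor_two_mul (a b : Nat) : (2 * a) ^^^ (2 * b) = 2 * (a ^^^ b) := by
  apply Nat.eq_of_testBit_eq
  intro i
  cases i with
  | zero =>
      rw [Nat.testBit_xor]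
      simp only [Nat.testBit_zero]
      rw [show 2 * a % 2 = 0 by omega, show 2 * b % 2 = 0 by omega,
          show 2 * (a ^^^ b) % 2 = 0 by omega]
      decide
  | succ i =>
      rw [Nat.testBit_xor]
      simp only [Nat.testBit_succ]
      rw [show 2 * a / 2 = a by omega, show 2 * b / 2 = b by omega,
          show 2 * (a ^^^ b) / 2 = a ^^^ b by omega, Nat.testBit_xor]

theorem xor_lowb_lt (n : Nat) (h : 0 < n) : n ^^^ lowb n < n := by
  induction n using Nat.strong_induction_on with
  | _ n ih =>
    rcases Nat.even_or_odd n with he | ho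
    · obtain ⟨m, hm⟩ := he
      have hm' : n = 2 * m := by omega
      have hmpos : 0 < m := by omega
      rw [hm', lowb_even m hmpos, xor_two_mul]
      have := ih m (by omega) hmpos
      omega
    · have h1 : n % 2 = 1 := Nat.odd_iff.mp ho
      rw [lowb_odd n h1, xor_one_odd n h1]
      omega

-- Int-to-Nat bridge cited by the B loop's decreasing_by.
theorem int_land_neg (n : Nat) (h : 0 < n) :
    Int.land (Int.ofNat n) (-(Int.ofNat n)) = Int.ofNat (lowb n) := by
  obtain ⟨m, rfl⟩ : ∃ m, n = m + 1 := ⟨n - 1, by omega⟩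
  rfl

theorem int_xor_ofNat (a b : Nat) : Int.xor (Int.ofNat a) (Int.ofNat b) = Int.ofNat (a ^^^ b) := rfl

theorem pvB_decr (fit : Int) (h : fit > 0) :
    (Int.xor fit (Int.land fit (-fit))).toNat < fit.toNat := by
  cases fit with
  | ofNat n =>
      have hn : 0 < n := by simp only [Int.ofNat_eq_natCast] at h; omega
      rw [int_land_neg n hn, int_xor_ofNat]
      exact xor_lowb_lt n hn
  | negSucc n => simp only [Int.negSucc_eq] at h; omega

-- while fit>0: low = fit & -fit; append low; fit ^= low
def oneHotLoopB (fit : Int) (acc : List Int) : List Int :=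
  if h : fit > 0 then
    let low := Int.land fit (-fit)
    oneHotLoopB (Int.xor fit low) (acc ++ [low])
  else acc
termination_by fit.toNat
decreasing_by exact pvB_decr fit h

def oneHotDecoder_alt (fit : Int) : List Int := oneHotLoopB fit []

-- ===== PRECONDITION & SPEC =====
def Spec_oneHotDecoder (fit : Int) (out : List Int) : Prop := out = oneHotDecoder_alt fit
instance (fit : Int) (out : List Int) : Decidable (Spec_oneHotDecoder fit out) := by unfold Spec_oneHotDecoder; infer_instance

-- ===== CLAIM (what is proved, stated in full; the proofs are below) =====
def Claim_equal_oneHotDecoder : Prop := ∀ (fit : Int), Dom_oneHotDecoder fit → Spec_oneHotDecoder fit (oneHotDecoder fit)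

-- ===== LEMMAS AND PROOFS =====

-- Reference function on Nat: A's per-position scan, acc-free.
def refA (n : Nat) (v : Int) : List Int :=
  if n = 0 then [] else (if n % 2 = 1 then [v] else []) ++ refA (n / 2) (2 * v)
termination_by n
decreasing_by exact Nat.div_lt_self (by omega) (by omega)

theorem refA_zero (v : Int) : refA 0 v = [] := by rw [refA]; norm_num

theorem refA_succ (n : Nat) (v : Int) (h : n ≠ 0) :
    refA n v = (if n % 2 = 1 then [v] else []) ++ refA (n / 2) (2 * v) := by
  rw [refA]; simp [h]

theorem loopA_eq_refA (k : Nat) : ∀ (fit value : Int) (acc : List Int), fit.toNat = k →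
    oneHotLoopA fit value acc = acc ++ refA fit.toNat value := by
  induction k using Nat.strong_induction_on with
  | _ k ih =>
    intro fit value acc hk
    rw [oneHotLoopA]
    by_cases h : fit > 0
    · rw [dif_pos h]
      cases fit with
      | negSucc n => simp only [Int.negSucc_eq] at h; omega
      | ofNat n =>
        have hn : 0 < n := by simp only [Int.ofNat_eq_natCast] at h; omega
        have hk' : n = k := hk
        have hshift : (Int.ofNat n >>> 1) = Int.ofNat (n / 2) := by
          rw [show (Int.ofNat n >>> 1) = Int.ofNat (n >>> 1) from rfl, Nat.shiftRight_one]
        have hsl : value <<< (1 : Int) = 2 * value := by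
          have := Int.shiftLeft_eq_mul_pow value 1
          norm_num at this
          omega
        have hcond : (PySem.Int.mod (Int.ofNat n) 2 = 1) ↔ (n % 2 = 1) := by
          rw [PySem.Int.mod_eq_emod_of_pos (by norm_num)]
          simp only [Int.ofNat_eq_natCast]
          omega
        rw [hshift, hsl, show (Int.ofNat n).toNat = n from rfl, refA_succ n value (by omega)]
        by_cases hodd : n % 2 = 1
        · rw [if_pos (hcond.mpr hodd), if_pos hodd,
              ih (n / 2) (by omega) (Int.ofNat (n / 2)) (2 * value) (acc ++ [value]) rfl,
              show (Int.ofNat (n / 2)).toNat = n / 2 from rfl]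
          simp
        · rw [if_neg (fun hh => hodd (hcond.mp hh)), if_neg hodd,
              ih (n / 2) (by omega) (Int.ofNat (n / 2)) (2 * value) acc rfl,
              show (Int.ofNat (n / 2)).toNat = n / 2 from rfl]
          simp
    · rw [dif_neg h]
      have h0 : fit.toNat = 0 := by omega
      rw [h0, refA_zero]
      simp

-- Scaling: refA with start value v is the v-multiple of refA with start value 1.
theorem refA_scale (k : Nat) : ∀ v : Int, refA k v = (refA k 1).map (v * ·) := by
  induction k using Nat.strong_induction_on with
  | _ k ih =>
    intro v
    by_cases h0 : k = 0
    · subst h0; rw [refA_zero, refA_zero]; simp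
    · rw [refA_succ k v h0, refA_succ k 1 h0,
          ih (k / 2) (Nat.div_lt_self (by omega) (by omega)) (2 * v),
          ih (k / 2) (Nat.div_lt_self (by omega) (by omega)) (2 * 1)]
      by_cases hodd : k % 2 = 1
      · rw [if_pos hodd, if_pos hodd]
        simp only [List.map_map, List.map_cons, List.singleton_append, Function.comp_def]
        congr 1
        · ring
        · congr 1; funext x; ring
      · rw [if_neg hodd, if_neg hodd]
        simp only [List.nil_append, List.map_map, Function.comp_def]
        congr 1; funext x; ring

-- Key step: refA strips exactly the lowest set bit at each cons.
theorem refA_lowb (k : Nat) (h : 0 < k) :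
    refA k 1 = (Int.ofNat (lowb k)) :: refA (k ^^^ lowb k) 1 := by
  induction k using Nat.strong_induction_on with
  | _ k ih =>
    rcases Nat.even_or_odd k with he | ho
    · obtain ⟨m, hm⟩ := he
      have hm' : k = 2 * m := by omega
      have hmpos : 0 < m := by omega
      subst hm'
      rw [lowb_even m hmpos, xor_two_mul,
          refA_succ (2 * m) 1 (by omega), if_neg (by omega), List.nil_append,
          show 2 * m / 2 = m by omega, show (2 : Int) * 1 = 2 by norm_num,
          refA_scale m 2, ih m (by omega) hmpos, List.map_cons]
      congr 1
      by_cases hz : m ^^^ lowb m = 0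
      · rw [hz]; simp [refA_zero]
      · rw [refA_succ (2 * (m ^^^ lowb m)) 1 (by omega), if_neg (by omega), List.nil_append,
            show 2 * (m ^^^ lowb m) / 2 = m ^^^ lowb m by omega,
            show (2 : Int) * 1 = 2 by norm_num, refA_scale (m ^^^ lowb m) 2]
    · have h1 : k % 2 = 1 := Nat.odd_iff.mp ho
      rw [lowb_odd k h1, xor_one_odd k h1, refA_succ k 1 (by omega), if_pos h1,
          List.singleton_append]
      congr 1
      by_cases hk1 : k = 1
      · subst hk1
        rw [show (1 : Nat) / 2 = 0 by norm_num, refA_zero, show (1 : Nat) - 1 = 0 by norm_num,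
            refA_zero]
      · rw [refA_succ (k - 1) 1 (by omega), if_neg (by omega), List.nil_append,
            show (k - 1) / 2 = k / 2 by omega]

-- B's loop computes refA _ 1.
theorem loopB_eq_refA (k : Nat) : ∀ (fit : Int) (acc : List Int), fit.toNat = k →
    oneHotLoopB fit acc = acc ++ refA fit.toNat 1 := by
  induction k using Nat.strong_induction_on with
  | _ k ih =>
    intro fit acc hk
    rw [oneHotLoopB]
    by_cases h : fit > 0
    · rw [dif_pos h]
      cases fit with
      | negSucc n => simp only [Int.negSucc_eq] at h; omega
      | ofNat n =>
        have hn : 0 < n := by simp only [Int.ofNat_eq_natCast] at h; omega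
        have hk' : n = k := hk
        simp only [int_land_neg n hn, int_xor_ofNat]
        rw [ih (n ^^^ lowb n) (by have := xor_lowb_lt n hn; omega)
              (Int.ofNat (n ^^^ lowb n)) (acc ++ [Int.ofNat (lowb n)]) rfl,
            show (Int.ofNat (n ^^^ lowb n)).toNat = n ^^^ lowb n from rfl,
            show (Int.ofNat n).toNat = n from rfl, refA_lowb n hn]
        simp
    · rw [dif_neg h]
      have h0 : fit.toNat = 0 := by omega
      rw [h0, refA_zero]
      simp

-- ===== VERDICT (by name: the statement is the Claim_ definition above) =====
theorem oneHotDecoder_spec : Claim_equal_oneHotDecoder := by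
  intro fit _
  show oneHotDecoder fit = oneHotDecoder_alt fit
  rw [oneHotDecoder, oneHotDecoder_alt,
      loopA_eq_refA fit.toNat fit 1 [] rfl, loopB_eq_refA fit.toNat fit [] rfl]
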